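-- pv_equiv track=rewrite | github.com/sokcho-kim/RegScan | regscan/stream/therapeutic.py | _group_by_atc
-- ===== SOURCE A (Python) =====
-- def _group_by_atc(
--
--     drugs: dict[str, dict],
--     atc_prefixes: list[str],
-- ) -> dict[str, int]:
--     """ATC 3단계 기준 그룹 크기 계산"""
--     atc_groups: dict[str, list[str]] = {}  # atc_3 -> [norm_inn, ...]
--     for norm, d in drugs.items():
--         atc = d.get("atc_code", "")
--         if len(atc) >= 4:
--             atc_3 = atc[:4]
--             atc_groups.setdefault(atc_3, []).append(norm)
--
--     # 각 약물에 같은 그룹 내 약물 수 반환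
--     result: dict[str, int] = {}
--     for atc_3, members in atc_groups.items():
--         for norm in members:
--             result[norm] = len(members)
--     return result
-- ===== SOURCE B (Python) =====
-- def _group_by_atc(
--     drugs: dict[str, dict],
--     atc_prefixes: list[str],
-- ) -> dict[str, int]:
--     """Flat pipeline: (norm, prefix) pairs once, dedup prefixes, dict comprehension with count."""
--     pairs = [(norm, d.get("atc_code", "")[:4])
--              for norm, d in drugs.items()
--              if len(d.get("atc_code", "")) >= 4]
--     prefixes = [q for _, q in pairs]
--     order = list(dict.fromkeys(prefixes))
--     return {norm: prefixes.count(p)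
--             for p in order
--             for norm, q in pairs if q == p}
-- ===== Notes on version B (the rewrite author's own statement) =====
-- stated objective: alternative
-- what changed: B is a flat pipeline: it extracts (norm, prefix) pairs once, dedups the prefixes in first-occurrence order, and builds the result as one dict comprehension using prefixes.count, storing no intermediate dict of member lists at all.
import Mathlib
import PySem

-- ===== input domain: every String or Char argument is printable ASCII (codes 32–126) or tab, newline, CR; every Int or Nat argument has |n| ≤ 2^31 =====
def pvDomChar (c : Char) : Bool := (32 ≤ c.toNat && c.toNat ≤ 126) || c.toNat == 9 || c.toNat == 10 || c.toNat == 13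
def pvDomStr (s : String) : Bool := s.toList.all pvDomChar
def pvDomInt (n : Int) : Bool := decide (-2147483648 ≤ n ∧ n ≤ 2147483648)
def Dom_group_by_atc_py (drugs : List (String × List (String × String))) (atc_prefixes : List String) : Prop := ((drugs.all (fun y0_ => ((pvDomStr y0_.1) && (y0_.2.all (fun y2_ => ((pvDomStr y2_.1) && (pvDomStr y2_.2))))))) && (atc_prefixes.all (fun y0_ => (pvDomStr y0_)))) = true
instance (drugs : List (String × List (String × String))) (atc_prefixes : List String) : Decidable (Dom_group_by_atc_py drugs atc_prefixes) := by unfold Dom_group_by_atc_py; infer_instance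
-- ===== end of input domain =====

-- B replaces A's accumulated dict of member lists by a flat pipeline (pairs, dedup, comprehension
-- with count): an alternative decomposition of the same task, not faster.

-- ===== PORT A =====
def group_by_atc_py (drugs : List (String × List (String × String))) (atc_prefixes : List String) : List (String × Int) :=
  -- atc_groups: dict atc_3 -> [norm, ...]; setdefault(p, []).append(norm) = modify p [] (· ++ [norm])
  let atc_groups : PySem.Dict String (List String) :=
    drugs.foldl (fun g nd =>
      let atc := (PySem.Dict.mk nd.2).getD "atc_code" ""
      if 4 ≤ PySem.Str.len atc then
        g.modify (PySem.Str.slice atc none (some 4)) [] (· ++ [nd.1])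
      else g) PySem.Dict.empty
  let result : PySem.Dict String Int :=
    atc_groups.items.foldl (fun r pm =>
      pm.2.foldl (fun r norm => r.insert norm (pm.2.length : Int)) r) PySem.Dict.empty
  result.items

-- ===== PORT B =====
def group_by_atc_py_alt (drugs : List (String × List (String × String))) (atc_prefixes : List String) : List (String × Int) :=
  let pairs : List (String × String) := drugs.filterMap (fun nd =>
    let atc := (PySem.Dict.mk nd.2).getD "atc_code" ""
    if 4 ≤ PySem.Str.len atc then some (nd.1, PySem.Str.slice atc none (some 4)) else none)
  let prefixes : List String := pairs.map Prod.snd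
  let order : PySem.Set String := PySem.Set.ofList prefixes
  -- the dict comprehension: entries in group order, collected into a dict
  let entries : List (String × Int) := order.flatMap (fun p =>
    (pairs.filter (fun nq => nq.2 == p)).map (fun nq => (nq.1, (prefixes.count p : Int))))
  (entries.foldl (fun r e => r.insert e.1 e.2) PySem.Dict.empty).items

-- ===== PRECONDITION & SPEC =====
def Spec_group_by_atc_py (drugs : List (String × List (String × String))) (atc_prefixes : List String) (out : List (String × Int)) : Prop := out = group_by_atc_py_alt drugs atc_prefixes
instance (drugs : List (String × List (String × String))) (atc_prefixes : List String) (out : List (String × Int)) : Decidable (Spec_group_by_atc_py drugs atc_prefixes out) := by unfold Spec_group_by_atc_py; infer_instance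

-- ===== CLAIM =====
def Claim_equal_group_by_atc_py : Prop := ∀ (drugs : List (String × List (String × String))) (atc_prefixes : List String), Dom_group_by_atc_py drugs atc_prefixes → Spec_group_by_atc_py drugs atc_prefixes (group_by_atc_py drugs atc_prefixes)

-- ===== LEMMAS AND PROOFS =====

-- the (prefix, norm) pair a drug row contributes (none when len(atc) < 4)
def pvPair (nd : String × List (String × String)) : Option (String × String) :=
  let atc := (PySem.Dict.mk nd.2).getD "atc_code" ""
  if 4 ≤ PySem.Str.len atc then some (PySem.Str.slice atc none (some 4), nd.1) else none

-- a guarded fold over drugs is a fold over the contributed pairs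
theorem pvFoldPairs {β : Type} (drugs : List (String × List (String × String)))
    (g : β → String × String → β) (b : β) :
    drugs.foldl (fun b nd => match pvPair nd with | some pn => g b pn | none => b) b
      = (drugs.filterMap pvPair).foldl g b := by
  induction drugs generalizing b with
  | nil => rfl
  | cons nd t ih =>
    simp only [List.foldl_cons, List.filterMap_cons]
    cases h : pvPair nd <;> simp [ih]

theorem pvGroupsKeys (valid : List (String × String)) :
    (valid.foldl (fun g pn => g.modify pn.1 [] (· ++ [pn.2])) PySem.Dict.empty).keys
      = PySem.Set.ofList (valid.map Prod.fst) := by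
  rw [PySem.Dict.keys_foldl_modify_key]
  simp [PySem.Set.update_nil_left]

theorem pvGroupsItems (valid : List (String × String)) :
    (valid.foldl (fun g pn => g.modify pn.1 [] (· ++ [pn.2])) PySem.Dict.empty).items
      = (PySem.Set.ofList (valid.map Prod.fst)).map
          (fun k => (k, (valid.filter (fun p => p.1 == k)).map (·.2))) := by
  rw [PySem.Dict.items_eq_map_keys _ (by rw [pvGroupsKeys]; exact PySem.Set.nodup_ofList _) [],
    pvGroupsKeys]
  refine List.map_congr_left (fun k _ => ?_)
  rw [PySem.Dict.getD_foldl_modify_append]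
  simp

theorem pvCountEq (valid : List (String × String)) (k : String) :
    ((valid.map Prod.fst).count k : Int)
      = (((valid.filter (fun p => p.1 == k)).map (·.2)).length : Int) := by
  simp [List.count, List.countP_eq_length_filter, List.filter_map, Function.comp_def]

theorem group_by_atc_py_spec : Claim_equal_group_by_atc_py := by
  intro drugs atc_prefixes _
  unfold Spec_group_by_atc_py group_by_atc_py group_by_atc_py_alt
  set valid := drugs.filterMap pvPair with hvalid
  -- A's grouping dict is the fold over contributed pairs
  have hGroups :
      drugs.foldl (fun g nd =>
          if 4 ≤ PySem.Str.len ((PySem.Dict.mk nd.2).getD "atc_code" "") then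
            g.modify (PySem.Str.slice ((PySem.Dict.mk nd.2).getD "atc_code" "") none (some 4))
              [] (· ++ [nd.1])
          else g) PySem.Dict.empty
        = valid.foldl (fun g pn => g.modify pn.1 [] (· ++ [pn.2])) PySem.Dict.empty := by
    rw [hvalid, ← pvFoldPairs]
    congr 1
    funext b nd
    simp only [pvPair]
    split <;> rfl
  -- B's pairs are the swapped contributed pairs
  have hPairs :
      drugs.filterMap (fun nd =>
          if 4 ≤ PySem.Str.len ((PySem.Dict.mk nd.2).getD "atc_code" "") then
            some (nd.1, PySem.Str.slice ((PySem.Dict.mk nd.2).getD "atc_code" "") none (some 4))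
          else none)
        = valid.map Prod.swap := by
    rw [hvalid, List.map_filterMap]
    refine List.filterMap_congr (fun nd _ => ?_)
    simp only [pvPair]
    split <;> rfl
  rw [hGroups, hPairs]
  dsimp only
  rw [pvGroupsItems]
  have hpref : (valid.map Prod.swap).map Prod.snd = valid.map Prod.fst := by
    simp [Function.comp_def]
  rw [hpref]
  congr 1
  rw [List.foldl_map, List.foldl_flatMap]
  refine List.foldl_ext _ _ _ ?_
  intro r k _
  rw [List.foldl_map]
  have hmem : (valid.map Prod.swap).filter (fun nq => nq.2 == k)
      = (valid.filter (fun p => p.1 == k)).map Prod.swap := by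
    rw [List.filter_map]; rfl
  rw [hmem, List.foldl_map, pvCountEq, List.foldl_map]
  rfl
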